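-- pv_equiv track=rewrite | github.com/Vecherskii/RegKG | src/pipeline/layout.py | _trailing_alpha
-- ===== SOURCE A (Python) =====
-- def _trailing_alpha(fragment: str) -> str:
--     """Return the trailing alphabetic token of `fragment` (possibly empty)."""
--     k = len(fragment) - 1
--     while k >= 0 and not fragment[k].isalpha():
--         k -= 1
--     if k < 0:
--         return ""
--     j = k
--     while j >= 0 and fragment[j].isalpha():
--         j -= 1
--     return fragment[j + 1 : k + 1]
-- ===== SOURCE B (Python) =====
-- def _trailing_alpha(fragment: str) -> str:
--     """Return the trailing alphabetic token of `fragment` (possibly empty).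
--
--     Single forward pass: accumulate the current alphabetic run; whenever a
--     non-alphabetic character ends a non-empty run, remember it as the last
--     completed token.  The answer is the still-open run if any, else the last
--     completed one.
--     """
--     last = ''
--     cur = ''
--     for ch in fragment:
--         if ch.isalpha():
--             cur += ch
--         else:
--             if cur:
--                 last = cur
--             cur = ''
--     return cur if cur else last
-- ===== Notes on version B (the rewrite author's own statement) =====
-- stated objective: alternative
-- what changed: Replaced A's backward two-pointer scan plus slice with a single forward pass that folds (last completed alphabetic run, current run) over the characters and returns the open run or else the last completed one.
import Mathlib
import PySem

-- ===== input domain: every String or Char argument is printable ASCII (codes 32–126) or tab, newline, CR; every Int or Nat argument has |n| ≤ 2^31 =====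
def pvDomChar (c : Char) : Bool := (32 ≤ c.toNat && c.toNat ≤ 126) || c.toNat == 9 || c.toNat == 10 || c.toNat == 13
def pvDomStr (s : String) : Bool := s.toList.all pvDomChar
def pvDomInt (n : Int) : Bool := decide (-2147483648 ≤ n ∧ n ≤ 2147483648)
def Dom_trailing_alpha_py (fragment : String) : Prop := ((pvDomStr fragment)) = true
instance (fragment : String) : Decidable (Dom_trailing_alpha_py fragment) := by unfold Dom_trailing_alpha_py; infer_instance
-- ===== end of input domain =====

-- B replaces A's backward two-pointer scan with a single forward fold keeping
-- (last completed alphabetic run, current run); objective: alternative decomposition.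

-- ===== PORT A =====
-- while k >= 0 and not fragment[k].isalpha(): k -= 1
-- (the guard checks 0 ≤ k first and k never exceeds len-1, so pyGetD's ' ' default is never read)
def pvLoop1 (cs : List Char) (k : Int) : Int :=
  if h : 0 ≤ k ∧ ¬ (PySem.Chars.isalpha (PySem.List.pyGetD cs k ' ') = true) then
    pvLoop1 cs (k - 1)
  else k
termination_by (k + 1).toNat
decreasing_by omega

-- while j >= 0 and fragment[j].isalpha(): j -= 1
def pvLoop2 (cs : List Char) (j : Int) : Int :=
  if h : 0 ≤ j ∧ PySem.Chars.isalpha (PySem.List.pyGetD cs j ' ') = true then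
    pvLoop2 cs (j - 1)
  else j
termination_by (j + 1).toNat
decreasing_by omega

def trailing_alpha_py (fragment : String) : String :=
  let k := pvLoop1 fragment.toList (PySem.Str.len fragment - 1)
  if k < 0 then ""
  else
    let j := pvLoop2 fragment.toList k
    -- fragment[j + 1 : k + 1], the string slice taken on the character list
    String.ofList (PySem.List.slice fragment.toList (some (j + 1)) (some (k + 1)))

-- ===== PORT B =====
-- one step of the forward pass: extend the current run, or close it off
def pvStep (s : List Char × List Char) (c : Char) : List Char × List Char :=
  if PySem.Chars.isalpha c then (s.1, s.2 ++ [c])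
  else if s.2 ≠ [] then (s.2, []) else (s.1, [])

def trailing_alpha_py_alt (fragment : String) : String :=
  let s := fragment.toList.foldl pvStep ([], [])
  if s.2 ≠ [] then String.ofList s.2 else String.ofList s.1

-- ===== PRECONDITION & SPEC =====
def Spec_trailing_alpha_py (fragment : String) (out : String) : Prop := out = trailing_alpha_py_alt fragment
instance (fragment : String) (out : String) : Decidable (Spec_trailing_alpha_py fragment out) := by unfold Spec_trailing_alpha_py; infer_instance

-- ===== CLAIM (what is proved, stated in full; the proofs are below) =====
def Claim_equal_trailing_alpha_py : Prop := ∀ (fragment : String), Dom_trailing_alpha_py fragment → Spec_trailing_alpha_py fragment (trailing_alpha_py fragment)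

-- ===== LEMMAS AND PROOFS =====

-- the last alphabetic run of a string, read off its REVERSED character list
def pvLastRunRev (rs : List Char) : List Char :=
  (rs.dropWhile (fun c => !PySem.Chars.isalpha c)).takeWhile (fun c => PySem.Chars.isalpha c)

lemma pvDropWhile_eq_drop (p : Char → Bool) (l : List Char) :
    l.dropWhile p = l.drop (l.takeWhile p).length := by
  induction l with
  | nil => simp
  | cons a l ih => by_cases h : p a <;> simp [h, ih]

lemma pvTakeWhile_eq_take (p : Char → Bool) (l : List Char) :
    l.takeWhile p = l.take (l.takeWhile p).length := by
  induction l with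
  | nil => simp
  | cons a l ih =>
    by_cases h : p a
    · simp only [List.takeWhile_cons, h, if_pos, List.length_cons, List.take_succ_cons]
      exact congrArg _ ih
    · simp [h]

lemma pvLoop1_spec (cs : List Char) (k : Nat) (hk : k < cs.length) :
    pvLoop1 cs (k : Int) =
      (k : Int) - (((cs.take (k + 1)).reverse.takeWhile (fun c => !PySem.Chars.isalpha c)).length : Int) := by
  induction k with
  | zero =>
    have hget : PySem.List.pyGetD cs ((0 : Nat) : Int) ' ' = cs[0] := by
      rw [PySem.List.pyGetD_eq_getElem cs ' ' (by omega) (by exact_mod_cast hk)]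
      simp
    have htake : cs.take (0 + 1) = [cs[0]] := by
      rw [List.take_add_one]
      simp [List.getElem?_eq_getElem hk]
    rw [htake]
    by_cases hα : PySem.Chars.isalpha cs[0] = true
    · rw [pvLoop1, dif_neg (by rintro ⟨-, h2⟩; rw [hget] at h2; exact h2 hα)]
      simp [hα]
    · rw [pvLoop1, dif_pos ⟨by omega, by rw [hget]; simp [hα]⟩]
      rw [pvLoop1, dif_neg (by rintro ⟨h1, -⟩; omega)]
      simp [hα]
  | succ k ih =>
    have hk1 : k + 1 < cs.length := hk
    have hget : PySem.List.pyGetD cs ((k + 1 : Nat) : Int) ' ' = cs[k + 1] := by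
      rw [PySem.List.pyGetD_eq_getElem cs ' ' (by omega) (by exact_mod_cast hk1)]
      simp
    have htake : cs.take (k + 1 + 1) = cs.take (k + 1) ++ [cs[k + 1]] := by
      rw [List.take_add_one]
      simp [List.getElem?_eq_getElem hk1]
    rw [htake]
    simp only [List.reverse_append, List.reverse_cons, List.reverse_nil, List.nil_append,
      List.singleton_append, List.takeWhile_cons]
    by_cases hα : PySem.Chars.isalpha cs[k + 1] = true
    · rw [pvLoop1, dif_neg (by rintro ⟨-, h2⟩; rw [hget] at h2; exact h2 hα)]
      simp [hα]
    · rw [pvLoop1, dif_pos ⟨by omega, by rw [hget]; simp [hα]⟩]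
      have hc : ((k + 1 : Nat) : Int) - 1 = (k : Int) := by push_cast; ring
      rw [hc, ih (by omega)]
      simp [hα]

lemma pvLoop2_spec (cs : List Char) (k : Nat) (hk : k < cs.length) :
    pvLoop2 cs (k : Int) =
      (k : Int) - (((cs.take (k + 1)).reverse.takeWhile (fun c => PySem.Chars.isalpha c)).length : Int) := by
  induction k with
  | zero =>
    have hget : PySem.List.pyGetD cs ((0 : Nat) : Int) ' ' = cs[0] := by
      rw [PySem.List.pyGetD_eq_getElem cs ' ' (by omega) (by exact_mod_cast hk)]
      simp
    have htake : cs.take (0 + 1) = [cs[0]] := by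
      rw [List.take_add_one]
      simp [List.getElem?_eq_getElem hk]
    rw [htake]
    by_cases hα : PySem.Chars.isalpha cs[0] = true
    · rw [pvLoop2, dif_pos ⟨by omega, by rw [hget]; exact hα⟩]
      rw [pvLoop2, dif_neg (by rintro ⟨h1, -⟩; omega)]
      simp [hα]
    · rw [pvLoop2, dif_neg (by rintro ⟨-, h2⟩; rw [hget] at h2; exact hα h2)]
      simp [hα]
  | succ k ih =>
    have hk1 : k + 1 < cs.length := hk
    have hget : PySem.List.pyGetD cs ((k + 1 : Nat) : Int) ' ' = cs[k + 1] := by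
      rw [PySem.List.pyGetD_eq_getElem cs ' ' (by omega) (by exact_mod_cast hk1)]
      simp
    have htake : cs.take (k + 1 + 1) = cs.take (k + 1) ++ [cs[k + 1]] := by
      rw [List.take_add_one]
      simp [List.getElem?_eq_getElem hk1]
    rw [htake]
    simp only [List.reverse_append, List.reverse_cons, List.reverse_nil, List.nil_append,
      List.singleton_append, List.takeWhile_cons]
    by_cases hα : PySem.Chars.isalpha cs[k + 1] = true
    · rw [pvLoop2, dif_pos ⟨by omega, by rw [hget]; exact hα⟩]
      have hc : ((k + 1 : Nat) : Int) - 1 = (k : Int) := by push_cast; ring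
      rw [hc, ih (by omega)]
      simp [hα]
    · rw [pvLoop2, dif_neg (by rintro ⟨-, h2⟩; rw [hget] at h2; exact hα h2)]
      simp [hα]

lemma pvA_char (s : String) :
    (trailing_alpha_py s).toList = (pvLastRunRev s.toList.reverse).reverse := by
  obtain ⟨n, hn⟩ : ∃ n, s.toList.length = n := ⟨_, rfl⟩
  simp only [trailing_alpha_py, PySem.Str.len_eq, hn]
  cases n with
  | zero =>
    have h0 : s.toList = [] := List.eq_nil_of_length_eq_zero hn
    rw [h0]
    rw [pvLoop1, dif_neg (by rintro ⟨h1, -⟩; omega)]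
    simp [pvLastRunRev]
  | succ m =>
    have hm : m < s.toList.length := by omega
    have hcast : ((m + 1 : Nat) : Int) - 1 = ((m : Nat) : Int) := by push_cast; ring
    have htakeall : s.toList.take (m + 1) = s.toList := List.take_of_length_le (by omega)
    rw [hcast, pvLoop1_spec s.toList m hm, htakeall]
    set cs := s.toList with hcs
    obtain ⟨M, hMdef⟩ : ∃ M, (cs.reverse.takeWhile (fun c => !PySem.Chars.isalpha c)).length = M :=
      ⟨_, rfl⟩
    rw [hMdef]
    have hMle : M ≤ m + 1 := by
      have h := (List.takeWhile_sublist (p := fun c => !PySem.Chars.isalpha c) (l := cs.reverse)).length_le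
      simp only [List.length_reverse, hn] at h
      omega
    by_cases hMtop : M = m + 1
    · rw [if_pos (by omega)]
      have hdw0 : cs.reverse.dropWhile (fun c => !PySem.Chars.isalpha c) = [] := by
        rw [pvDropWhile_eq_drop, hMdef, hMtop]
        apply List.drop_eq_nil_of_le
        simp [hn]
      simp [pvLastRunRev, hdw0]
    · have hMlt : M < m + 1 := lt_of_le_of_ne hMle hMtop
      rw [if_neg (by omega)]
      have hk : ((m : Nat) : Int) - (M : Int) = ((m - M : Nat) : Int) := by omega
      rw [hk, pvLoop2_spec cs (m - M) (by omega)]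
      obtain ⟨t, htdef⟩ :
          ∃ t, ((cs.take (m - M + 1)).reverse.takeWhile (fun c => PySem.Chars.isalpha c)).length = t :=
        ⟨_, rfl⟩
      rw [htdef]
      have hrev : (cs.take (m - M + 1)).reverse = cs.reverse.drop M := by
        rw [List.reverse_take]
        congr 1
        omega
      have hdw : cs.reverse.dropWhile (fun c => !PySem.Chars.isalpha c) = cs.reverse.drop M := by
        rw [pvDropWhile_eq_drop, hMdef]
      have htle : t ≤ m - M + 1 := by
        have h := (List.takeWhile_sublist (p := fun c => PySem.Chars.isalpha c)
          (l := (cs.take (m - M + 1)).reverse)).length_le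
        simp only [List.length_reverse, List.length_take, hn] at h
        omega
      have htw : pvLastRunRev cs.reverse = (cs.reverse.drop M).take t := by
        rw [pvLastRunRev, hdw, pvTakeWhile_eq_take]
        congr 1
        rw [← hrev]
        exact htdef
      have hj1 : ((m - M : Nat) : Int) - (t : Int) + 1 = ((m - M + 1 - t : Nat) : Int) := by omega
      have hk1 : ((m - M : Nat) : Int) + 1 = ((m - M + 1 : Nat) : Int) := by push_cast; ring
      rw [hj1, hk1, PySem.List.slice_natCast, String.toList_ofList, htw, ← hrev]
      rw [List.reverse_take]
      simp only [List.reverse_reverse, List.length_reverse, List.length_take, hn]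
      have hmin : min (m - M + 1) (m + 1) = m - M + 1 := by omega
      rw [List.drop_take, hmin]

lemma pvB_fold (cs : List Char) :
    cs.foldl pvStep ([], []) =
      ((pvLastRunRev (cs.reverse.dropWhile (fun c => PySem.Chars.isalpha c))).reverse,
       (cs.reverse.takeWhile (fun c => PySem.Chars.isalpha c)).reverse) := by
  induction cs using List.reverseRecOn with
  | nil => simp [pvLastRunRev]
  | append_singleton cs c ih =>
    rw [List.foldl_append, ih]
    simp only [List.foldl_cons, List.foldl_nil, List.reverse_append, List.reverse_cons,
      List.reverse_nil, List.nil_append, List.singleton_append]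
    by_cases hα : PySem.Chars.isalpha c = true
    · simp [pvStep, hα]
    · have hrun : pvLastRunRev (c :: cs.reverse) = pvLastRunRev cs.reverse := by
        simp [pvLastRunRev, hα]
      simp only [pvStep, hα, Bool.false_eq_true, if_false, List.takeWhile_cons,
        List.dropWhile_cons, List.reverse_nil, hrun]
      cases hrs : cs.reverse with
      | nil => simp [pvLastRunRev]
      | cons r rs' =>
        by_cases hr : PySem.Chars.isalpha r = true
        · have h1 : (r :: rs').takeWhile (fun c => PySem.Chars.isalpha c) ≠ [] := by
            simp [hr]
          have h2 : pvLastRunRev (r :: rs') = (r :: rs').takeWhile (fun c => PySem.Chars.isalpha c) := by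
            simp [pvLastRunRev, hr]
          simp [h1, h2]
        · have h1 : (r :: rs').takeWhile (fun c => PySem.Chars.isalpha c) = [] := by
            simp [hr]
          have h2 : (r :: rs').dropWhile (fun c => PySem.Chars.isalpha c) = r :: rs' := by
            simp [hr]
          simp [h1, h2]

lemma pvB_char (s : String) :
    (trailing_alpha_py_alt s).toList = (pvLastRunRev s.toList.reverse).reverse := by
  simp only [trailing_alpha_py_alt]
  rw [pvB_fold]
  cases hrs : s.toList.reverse with
  | nil => simp [pvLastRunRev]
  | cons r rs' =>
    by_cases hr : PySem.Chars.isalpha r = true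
    · have h1 : (r :: rs').takeWhile (fun c => PySem.Chars.isalpha c) ≠ [] := by
        simp [hr]
      have h2 : pvLastRunRev (r :: rs') = (r :: rs').takeWhile (fun c => PySem.Chars.isalpha c) := by
        simp [pvLastRunRev, hr]
      simp [h1, h2]
    · have h1 : (r :: rs').takeWhile (fun c => PySem.Chars.isalpha c) = [] := by
        simp [hr]
      have h2 : (r :: rs').dropWhile (fun c => PySem.Chars.isalpha c) = r :: rs' := by
        simp [hr]
      simp [h1, h2]

-- ===== VERDICT (by name: the statement is the Claim_ definition above) =====
theorem trailing_alpha_py_spec : Claim_equal_trailing_alpha_py := by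
  intro fragment _
  unfold Spec_trailing_alpha_py
  rw [← String.toList_inj, pvA_char, pvB_char]
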